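-- pv_equiv track=rewrite | github.com/CP-STA/contest-problems | montmort-number/generator_memo.py | solve
-- ===== SOURCE A (Python) =====
-- from math import gcd, factorial
--
-- def solve(N):
--     ans = 0
--     for k in range(2, N + 1):
--         if k % 2 == 0:
--             ans += factorial(N) // factorial(k)
--         else:
--             ans -= factorial(N) // factorial(k)
--     return ans
-- ===== SOURCE B (Python) =====
-- def solve(N):
--     # One descending pass maintaining p = N! // k! incrementally (O(N) big-int mults).
--     ans = 0
--     p = 1
--     for k in range(N, 1, -1):
--         if k % 2 == 0:
--             ans += p
--         else:
--             ans -= p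
--         p *= k
--     return ans
-- ===== Notes on version B (the rewrite author's own statement) =====
-- stated objective: faster
-- what changed: Instead of recomputing factorial(N)//factorial(k) from scratch for every k, B runs one descending loop that maintains the running product N!/k! incrementally, so each term costs one big-int multiplication.
import Mathlib
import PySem

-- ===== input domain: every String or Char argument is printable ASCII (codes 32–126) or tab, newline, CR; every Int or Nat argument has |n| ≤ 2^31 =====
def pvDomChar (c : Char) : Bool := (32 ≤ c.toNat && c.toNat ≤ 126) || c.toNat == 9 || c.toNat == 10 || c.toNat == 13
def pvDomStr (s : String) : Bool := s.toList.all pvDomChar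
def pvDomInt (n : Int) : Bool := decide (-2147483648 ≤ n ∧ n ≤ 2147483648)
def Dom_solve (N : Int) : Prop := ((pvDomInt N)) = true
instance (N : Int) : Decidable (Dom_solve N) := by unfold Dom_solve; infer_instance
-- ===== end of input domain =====

-- B replaces A's per-term factorial quotients by one descending loop maintaining the
-- running product N!/k! (objective: faster, O(N) big-int multiplications instead of O(N^2)).

-- ===== PORT A =====
-- math.factorial; A only calls it with arguments ≥ 2 (the loop body runs only when k ≥ 2).
def pyFact (n : Int) : Int := ((n.toNat).factorial : Int)

def solve (N : Int) : Int :=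
  (PySem.List.pyRange 2 (N + 1) 1).foldl
    (fun ans k =>
      if PySem.Int.mod k 2 = 0 then
        ans + PySem.Int.floordiv (pyFact N) (pyFact k)
      else
        ans - PySem.Int.floordiv (pyFact N) (pyFact k)) 0

-- ===== PORT B =====
def solve_alt (N : Int) : Int :=
  ((PySem.List.pyRange N 1 (-1)).foldl
    (fun (s : Int × Int) k =>
      ((if PySem.Int.mod k 2 = 0 then s.1 + s.2 else s.1 - s.2), s.2 * k)) (0, 1)).1

-- ===== PRECONDITION & SPEC =====
def Spec_solve (N : Int) (out : Int) : Prop := out = solve_alt N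
instance (N : Int) (out : Int) : Decidable (Spec_solve N out) := by unfold Spec_solve; infer_instance

-- ===== CLAIM (what is proved, stated in full; the proofs are below) =====
def Claim_equal_solve : Prop := ∀ (N : Int), Dom_solve N → Spec_solve N (solve N)

-- ===== LEMMAS AND PROOFS =====

-- the signed partial sums B's descending loop accumulates
def sumTerms : List Int → Int → Int
  | [], _ => 0
  | k :: L, p => (if PySem.Int.mod k 2 = 0 then p else -p) + sumTerms L (p * k)

-- A's foldl as a list sum
theorem foldA_eq_sum (L : List Int) (a : Int) (f : Int → Int) :
    L.foldl (fun ans k => if PySem.Int.mod k 2 = 0 then ans + f k else ans - f k) a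
      = a + (L.map (fun k => if PySem.Int.mod k 2 = 0 then f k else -f k)).sum := by
  induction L generalizing a with
  | nil => simp
  | cons k L ih => simp only [List.foldl_cons, List.map_cons, List.sum_cons, ih]; split <;> ring

-- B's pair foldl computes sumTerms in its first component
theorem foldB_fst (L : List Int) (a p : Int) :
    (L.foldl (fun (s : Int × Int) k =>
      ((if PySem.Int.mod k 2 = 0 then s.1 + s.2 else s.1 - s.2), s.2 * k)) (a, p)).1
      = a + sumTerms L p := by
  induction L generalizing a p with
  | nil => simp [sumTerms]
  | cons k L ih => simp only [List.foldl_cons, sumTerms, ih]; split <;> ring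

theorem fact_succ_div (m j : Nat) (hj : j ≤ m) :
    ((m + 1 : Nat) : Int) * PySem.Int.floordiv ((m.factorial : Nat) : Int) ((j.factorial : Nat) : Int)
      = PySem.Int.floordiv (((m + 1).factorial : Nat) : Int) ((j.factorial : Nat) : Int) := by
  rw [PySem.Int.floordiv_natCast, PySem.Int.floordiv_natCast]
  have hdvd : j.factorial ∣ m.factorial := Nat.factorial_dvd_factorial hj
  have : (m + 1) * (m.factorial / j.factorial) = (m + 1).factorial / j.factorial := by
    rw [Nat.factorial_succ, Nat.mul_div_assoc _ hdvd]
  exact_mod_cast congrArg (fun n : Nat => (n : Int)) this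

-- main invariant: the descending accumulation equals A's term list, scaled by p
theorem main_inv (m : Nat) (p : Int) :
    sumTerms (PySem.List.pyRange (m : Int) 1 (-1)) p
      = ((PySem.List.pyRange 2 ((m : Int) + 1) 1).map
          (fun k => if PySem.Int.mod k 2 = 0
            then p * PySem.Int.floordiv (pyFact (m : Int)) (pyFact k)
            else -(p * PySem.Int.floordiv (pyFact (m : Int)) (pyFact k)))).sum := by
  induction m generalizing p with
  | zero =>
    rw [PySem.List.pyRange_neg_one_eq_nil (by norm_num), PySem.List.pyRange_one_eq_nil (by norm_num)]
    simp [sumTerms]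
  | succ m ih =>
    by_cases hm : m = 0
    · subst hm
      rw [PySem.List.pyRange_neg_one_eq_nil (by norm_num), PySem.List.pyRange_one_eq_nil (by norm_num)]
      simp [sumTerms]
    · have hm1 : 1 ≤ m := Nat.one_le_iff_ne_zero.mpr hm
      have hcons : PySem.List.pyRange ((m + 1 : Nat) : Int) 1 (-1)
          = ((m + 1 : Nat) : Int) :: PySem.List.pyRange ((m : Nat) : Int) 1 (-1) := by
        have h := PySem.List.pyRange_neg_one_cons (a := ((m + 1 : Nat) : Int)) (b := 1)
          (by exact_mod_cast Nat.lt_succ_of_le hm1)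
        rw [h, show ((m + 1 : Nat) : Int) - 1 = ((m : Nat) : Int) from by push_cast; ring]
      have hsplit : PySem.List.pyRange 2 (((m + 1 : Nat) : Int) + 1) 1
          = PySem.List.pyRange 2 (((m : Nat) : Int) + 1) 1 ++ [((m + 1 : Nat) : Int)] := by
        have h := PySem.List.pyRange_one_succ_right (a := 2) (b := ((m + 1 : Nat) : Int))
          (by exact_mod_cast Nat.succ_le_succ hm1)
        rw [h, show ((m + 1 : Nat) : Int) = ((m : Nat) : Int) + 1 from by push_cast; ring]
      rw [hcons, hsplit]
      simp only [sumTerms, List.map_append, List.sum_append, List.map_cons, List.map_nil,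
        List.sum_cons, List.sum_nil, ih]
      have hlast : PySem.Int.floordiv (pyFact ((m + 1 : Nat) : Int)) (pyFact ((m + 1 : Nat) : Int)) = 1 := by
        simp only [pyFact, Int.toNat_natCast, PySem.Int.floordiv_natCast,
          Nat.div_self (Nat.factorial_pos _)]
        norm_num
      have hmap : (PySem.List.pyRange 2 (((m : Nat) : Int) + 1) 1).map
            (fun k => if PySem.Int.mod k 2 = 0
              then p * ((m + 1 : Nat) : Int) * PySem.Int.floordiv (pyFact ((m : Nat) : Int)) (pyFact k)
              else -(p * ((m + 1 : Nat) : Int) * PySem.Int.floordiv (pyFact ((m : Nat) : Int)) (pyFact k)))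
          = (PySem.List.pyRange 2 (((m : Nat) : Int) + 1) 1).map
            (fun k => if PySem.Int.mod k 2 = 0
              then p * PySem.Int.floordiv (pyFact ((m + 1 : Nat) : Int)) (pyFact k)
              else -(p * PySem.Int.floordiv (pyFact ((m + 1 : Nat) : Int)) (pyFact k))) := by
        apply List.map_congr_left
        intro k hk
        have hbk := (PySem.List.mem_pyRange_one).mp hk
        have hknn : k = ((k.toNat : Nat) : Int) := by omega
        have hjle : k.toNat ≤ m := by omega
        have hfd : ((m + 1 : Nat) : Int) * PySem.Int.floordiv (pyFact ((m : Nat) : Int)) (pyFact k)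
            = PySem.Int.floordiv (pyFact ((m + 1 : Nat) : Int)) (pyFact k) := by
          rw [hknn]
          simp only [pyFact, Int.toNat_natCast]
          exact fact_succ_div m k.toNat hjle
        rw [mul_assoc, hfd]
      rw [hlast]
      rw [hmap]
      split <;> ring

-- ===== VERDICT (by name: the statement is the Claim_ definition above) =====
theorem solve_spec : Claim_equal_solve := by
  intro N _
  unfold Spec_solve solve solve_alt
  by_cases h : N ≤ 1
  · rw [PySem.List.pyRange_one_eq_nil (by omega), PySem.List.pyRange_neg_one_eq_nil h]
    simp
  · rw [foldA_eq_sum, foldB_fst,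
      show N = ((N.toNat : Nat) : Int) from by omega, main_inv N.toNat 1]
    simp
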